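-- pv_equiv track=rewrite | github.com/Eugene-Mikhalaki/mr-lead-agent | src/mr_lead_agent/gitlab_client.py | _build_diff_lines_map
-- ===== SOURCE A (Python) =====
-- def _build_diff_lines_map(diff: str) -> dict[str, dict[int, str]]:
--     """Parse unified diff into {file_path: {new_line_no: '±1 line snippet'}}.
--
--     Used to attach small code context to inline MR comments.
--     """
--     result: dict[str, list[tuple[int, str]]] = {}
--     current_file = ""
--     current_new_line = 0
--
--     for raw_line in diff.splitlines():
--         if raw_line.startswith("+++ b/"):
--             current_file = raw_line[6:]
--             if current_file not in result:
--                 result[current_file] = []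
--         elif raw_line.startswith("@@ "):
--             # Parse @@ -old,count +new,count @@
--             parts = raw_line.split("+")
--             if len(parts) >= 2:
--                 try:
--                     current_new_line = int(parts[1].split(",")[0]) - 1
--                 except (ValueError, IndexError):
--                     current_new_line = 0
--         elif raw_line.startswith("-"):
--             continue  # deleted line — doesn't increment new line counter
--         else:
--             current_new_line += 1
--             if current_file:
--                 # Store line content (strip the leading '+' or ' ')
--                 content = raw_line[1:] if raw_line.startswith("+") else raw_line
--                 result.setdefault(current_file, []).append((current_new_line, content))
--
--     # Build ±1 line snippets
--     snippets: dict[str, dict[int, str]] = {}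
--     for file_path, lines in result.items():
--         line_map: dict[int, str] = {ln: content for ln, content in lines}
--         snippet_map: dict[int, str] = {}
--         for ln, content in lines:
--             context_lines = []
--             for offset in (-1, 0, 1):
--                 target = ln + offset
--                 if target in line_map:
--                     marker = "→ " if offset == 0 else "  "
--                     context_lines.append(f"{target}: {marker}{line_map[target]}")
--             snippet_map[ln] = "\n".join(context_lines)
--         snippets[file_path] = snippet_map
--
--     return snippets
-- ===== SOURCE B (Python) =====
-- def _build_diff_lines_map(diff: str) -> dict[str, dict[int, str]]:
--     """Parse unified diff into {file_path: {new_line_no: '±1 line snippet'}}.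
--
--     Re-implementation: pass 1 emits an ordered file registry plus a flat
--     (file, line_no, content) event stream; pass 2 groups events per file;
--     pass 3 sorts each file's deduped lines by line number and finds the
--     ±1 neighbours POSITIONALLY in that sorted list (adjacency of
--     consecutive entries) instead of hash-membership tests on ln±1.
--     """
--     files: list[str] = []
--     events: list[tuple[str, int, str]] = []
--     current_file = ""
--     current_new_line = 0
--     for raw_line in diff.splitlines():
--         if raw_line.startswith("+++ b/"):
--             current_file = raw_line[6:]
--             if current_file not in files:
--                 files.append(current_file)
--         elif raw_line.startswith("@@ "):
--             parts = raw_line.split("+")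
--             if len(parts) >= 2:
--                 try:
--                     current_new_line = int(parts[1].split(",")[0]) - 1
--                 except ValueError:
--                     current_new_line = 0
--         elif raw_line.startswith("-"):
--             continue
--         else:
--             current_new_line += 1
--             if current_file:
--                 content = raw_line[1:] if raw_line.startswith("+") else raw_line
--                 events.append((current_file, current_new_line, content))
--
--     per_file: dict[str, list[tuple[int, str]]] = {fp: [] for fp in files}
--     for fp, ln, content in events:
--         per_file[fp].append((ln, content))
--
--     snippets: dict[str, dict[int, str]] = {}
--     for fp, pairs in per_file.items():
--         line_map = dict(pairs)
--         ordered = sorted(line_map.items(), key=lambda p: p[0])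
--         snip: dict[int, str] = {}
--         for i, (ln, content) in enumerate(ordered):
--             rows = []
--             if i > 0 and ordered[i - 1][0] == ln - 1:
--                 rows.append(f"{ln - 1}:   {ordered[i - 1][1]}")
--             rows.append(f"{ln}: → {content}")
--             if i + 1 < len(ordered) and ordered[i + 1][0] == ln + 1:
--                 rows.append(f"{ln + 1}:   {ordered[i + 1][1]}")
--             snip[ln] = "\n".join(rows)
--         snippets[fp] = {ln: snip[ln] for ln in line_map}
--     return snippets
-- ===== Notes on version B (the rewrite author's own statement) =====
-- stated objective: alternative
-- what changed: B restructures both phases: the parse emits a flat (file, line, content) event stream plus an ordered file registry which a separate pass groups per file, and the snippet phase sorts each file's deduped lines by line number and takes the ±1 neighbours POSITIONALLY from adjacent entries of the sorted list instead of A's hash-membership tests on ln±1 offsets.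
import Mathlib
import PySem

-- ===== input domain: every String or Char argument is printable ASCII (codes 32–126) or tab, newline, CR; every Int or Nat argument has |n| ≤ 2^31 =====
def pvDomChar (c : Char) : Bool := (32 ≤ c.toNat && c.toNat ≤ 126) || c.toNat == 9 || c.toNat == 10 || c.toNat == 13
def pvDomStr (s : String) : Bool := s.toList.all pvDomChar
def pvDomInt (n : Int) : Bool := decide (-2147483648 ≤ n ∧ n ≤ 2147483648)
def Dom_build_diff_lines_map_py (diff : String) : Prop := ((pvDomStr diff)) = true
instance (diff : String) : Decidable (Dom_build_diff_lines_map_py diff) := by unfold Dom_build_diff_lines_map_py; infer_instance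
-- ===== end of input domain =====

-- B reorganises both phases: the parse emits a flat (file, line, content) event stream plus an
-- ordered file registry, a separate pass groups events per file, and the snippet phase sorts each
-- file's deduped lines and takes ±1 neighbours positionally from the sorted list instead of A's
-- hash-membership tests on ln±1; objective: alternative (same result, different structure).

-- ===== PORT A =====
-- inner "for offset in (-1, 0, 1)" loop building context_lines;
-- Python's "target in line_map" guard + "line_map[target]" subscript are ported together as one get? match (exact: the subscript only runs under the guard)
def pvSnippetA (lineMap : PySem.Dict Int String) (ln : Int) : String :=
  PySem.Str.join "\n" (([(-1 : Int), 0, 1]).foldl (fun cl off =>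
    let target := ln + off
    match lineMap.get? target with
    | some v => cl ++ [PySem.Int.toStr target ++ ": " ++ (if off = 0 then "→ " else "  ") ++ v]
    | none => cl) [])

-- one iteration of A's main "for raw_line in diff.splitlines()" loop; state = (result, current_file, current_new_line)
-- parts[1] and .split(",")[0] are guarded total indexings (len(parts) >= 2 is checked; split of a non-empty separator is never empty), ported as getD
def pvStepA (st : PySem.Dict String (List (Int × String)) × String × Int) (raw : String) :
    PySem.Dict String (List (Int × String)) × String × Int :=
  if PySem.Str.startswith raw "+++ b/" then
    let cf := PySem.Str.slice raw (some 6) none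
    (if st.1.contains cf then st.1 else st.1.insert cf [], cf, st.2.2)
  else if PySem.Str.startswith raw "@@ " then
    let parts := (PySem.Str.split? raw "+").getD []
    if 2 ≤ parts.length then
      match PySem.Int.ofStr? (((PySem.Str.split? (parts.getD 1 "") ",").getD []).getD 0 "") with
      | some n => (st.1, st.2.1, n - 1)
      | none => (st.1, st.2.1, 0)
    else st
  else if PySem.Str.startswith raw "-" then st
  else
    let ln := st.2.2 + 1
    if st.2.1 ≠ "" then
      let content := if PySem.Str.startswith raw "+" then PySem.Str.slice raw (some 1) none else raw
      (st.1.insert st.2.1 (st.1.getD st.2.1 [] ++ [(ln, content)]), st.2.1, ln)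
    else (st.1, st.2.1, ln)

def build_diff_lines_map_py (diff : String) : List (String × List (Int × String)) :=
  let st := (PySem.Str.splitlines diff).foldl pvStepA (PySem.Dict.empty, "", 0)
  let snippets : PySem.Dict String (PySem.Dict Int String) :=
    st.1.items.foldl (fun sn p =>
      let lineMap := p.2.foldl (fun d q => d.insert q.1 q.2) PySem.Dict.empty
      let snippetMap := p.2.foldl (fun sm q => sm.insert q.1 (pvSnippetA lineMap q.1)) PySem.Dict.empty
      sn.insert p.1 snippetMap) PySem.Dict.empty
  snippets.items.map (fun p => (p.1, p.2.items))

-- ===== PORT B =====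
-- one iteration of B's parse; state = (files, events, current_file, current_new_line)
def pvStepB (st : List String × List (String × Int × String) × String × Int) (raw : String) :
    List String × List (String × Int × String) × String × Int :=
  if PySem.Str.startswith raw "+++ b/" then
    let cf := PySem.Str.slice raw (some 6) none
    (if cf ∈ st.1 then st.1 else st.1 ++ [cf], st.2.1, cf, st.2.2.2)
  else if PySem.Str.startswith raw "@@ " then
    let parts := (PySem.Str.split? raw "+").getD []
    if 2 ≤ parts.length then
      match PySem.Int.ofStr? (((PySem.Str.split? (parts.getD 1 "") ",").getD []).getD 0 "") with
      | some n => (st.1, st.2.1, st.2.2.1, n - 1)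
      | none => (st.1, st.2.1, st.2.2.1, 0)
    else st
  else if PySem.Str.startswith raw "-" then st
  else
    let ln := st.2.2.2 + 1
    if st.2.2.1 ≠ "" then
      let content := if PySem.Str.startswith raw "+" then PySem.Str.slice raw (some 1) none else raw
      (st.1, st.2.1 ++ [(st.2.2.1, ln, content)], st.2.2.1, ln)
    else (st.1, st.2.1, st.2.2.1, ln)

-- the rows list of B's indexed scan over the sorted entries; ordered[i∓1] subscripts run only
-- under the index guards (exact), ported as pyGetD with a junk default
def pvRowsB (ordered : List (Int × String)) (i : Int) (ln : Int) (content : String) : String :=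
  PySem.Str.join "\n"
    ((if 0 < i ∧ (PySem.List.pyGetD ordered (i - 1) (0, "")).1 = ln - 1
      then [PySem.Int.toStr (ln - 1) ++ ":   " ++ (PySem.List.pyGetD ordered (i - 1) (0, "")).2]
      else [])
     ++ [PySem.Int.toStr ln ++ ": → " ++ content]
     ++ (if i + 1 < (ordered.length : Int) ∧ (PySem.List.pyGetD ordered (i + 1) (0, "")).1 = ln + 1
         then [PySem.Int.toStr (ln + 1) ++ ":   " ++ (PySem.List.pyGetD ordered (i + 1) (0, "")).2]
         else []))

-- the body of B's pass-3 loop for one file: dedup, sort by line number, positional ±1 scan,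
-- reorder back to first-insertion key order ({ln: snip[ln] for ln in line_map}; every line_map
-- key is a key of snip, so the snip[ln] subscript is total and ported as getD)
def pvFileSnips (pairs : List (Int × String)) : PySem.Dict Int String :=
  let lineMap := pairs.foldl (fun d q => d.insert q.1 q.2) PySem.Dict.empty
  let ordered := PySem.List.sorted lineMap.items (fun p => p.1) false
  let snip := (PySem.List.enumerate ordered 0).foldl
      (fun sm iq => sm.insert iq.2.1 (pvRowsB ordered iq.1 iq.2.1 iq.2.2)) PySem.Dict.empty
  lineMap.keys.foldl (fun d k => d.insert k (snip.getD k "")) PySem.Dict.empty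

def build_diff_lines_map_py_alt (diff : String) : List (String × List (Int × String)) :=
  let st := (PySem.Str.splitlines diff).foldl pvStepB ([], [], "", 0)
  -- per_file = {fp: [] for fp in files}; per_file[fp].append(...) — every event's file was
  -- registered, so the subscript is total and ported as getD
  let perFile := st.2.1.foldl (fun d e => d.insert e.1 (d.getD e.1 [] ++ [e.2]))
      (st.1.foldl (fun d fp => d.insert fp ([] : List (Int × String))) PySem.Dict.empty)
  let snippets := perFile.items.foldl (fun sn p => sn.insert p.1 (pvFileSnips p.2)) PySem.Dict.empty
  snippets.items.map (fun p => (p.1, p.2.items))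

-- ===== PRECONDITION & SPEC =====
def Spec_build_diff_lines_map_py (diff : String) (out : List (String × List (Int × String))) : Prop := out = build_diff_lines_map_py_alt diff
instance (diff : String) (out : List (String × List (Int × String))) : Decidable (Spec_build_diff_lines_map_py diff out) := by unfold Spec_build_diff_lines_map_py; infer_instance

-- ===== CLAIM (what is proved, stated in full; the proofs are below) =====
def Claim_equal_build_diff_lines_map_py : Prop := ∀ (diff : String), Dom_build_diff_lines_map_py diff → Spec_build_diff_lines_map_py diff (build_diff_lines_map_py diff)

-- ===== LEMMAS AND PROOFS =====

-- ----- phase 1: A's dict of lists is the grouping of B's event stream by B's file registry -----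

-- events for one file, in order
def pvEvFor (f : String) (es : List (String × Int × String)) : List (Int × String) :=
  es.filterMap (fun e => if e.1 = f then some e.2 else none)

def pvGroup (files : List String) (es : List (String × Int × String)) :
    PySem.Dict String (List (Int × String)) :=
  PySem.Dict.mk (files.map (fun f => (f, pvEvFor f es)))

theorem pvEvFor_append (f : String) (es : List (String × Int × String)) (e : String × Int × String) :
    pvEvFor f (es ++ [e]) = pvEvFor f es ++ (if e.1 = f then [e.2] else []) := by
  simp only [pvEvFor, List.filterMap_append, List.filterMap_cons, List.filterMap_nil]
  split_ifs <;> simp_all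

theorem pvEvFor_eq_nil (f : String) (files : List String) (es : List (String × Int × String))
    (hf : f ∉ files) (hes : ∀ e ∈ es, e.1 ∈ files) : pvEvFor f es = [] := by
  rw [pvEvFor, List.filterMap_eq_nil_iff]
  intro e he
  have : e.1 ≠ f := fun h => hf (h ▸ hes e he)
  simp [this]

theorem pvGroup_keys (files : List String) (es : List (String × Int × String)) :
    (pvGroup files es).keys = files := by
  show (files.map (fun f => (f, pvEvFor f es))).map Prod.fst = files
  rw [List.map_map]
  exact List.map_id files

theorem pvGroup_contains (files : List String) (es : List (String × Int × String)) (f : String) :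
    (pvGroup files es).contains f = decide (f ∈ files) := by
  rw [PySem.Dict.contains_eq_decide_mem_keys, pvGroup_keys]

theorem pvGroup_getD (files : List String) (es : List (String × Int × String)) (f : String)
    (hnd : files.Nodup) (hf : f ∈ files) :
    (pvGroup files es).getD f [] = pvEvFor f es := by
  apply PySem.Dict.getD_of_mem_items
  · exact List.mem_map.mpr ⟨f, hf, rfl⟩
  · rw [pvGroup_keys]; exact hnd

theorem pvGroup_insert (files : List String) (es : List (String × Int × String))
    (e : String × Int × String) (he : e.1 ∈ files) :
    (pvGroup files es).insert e.1 (pvEvFor e.1 es ++ [e.2]) = pvGroup files (es ++ [e]) := by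
  apply PySem.Dict.ext
  rw [PySem.Dict.items_insert_of_contains _ _ (by rw [pvGroup_contains]; simpa using he)]
  show (files.map (fun f => (f, pvEvFor f es))).map _ = files.map _
  rw [List.map_map]
  apply List.map_congr_left
  intro f _
  by_cases h : f = e.1
  · subst h
    simp [pvEvFor_append]
  · have hb : (f == e.1) = false := by simpa using h
    simp only [Function.comp, hb, pvEvFor_append, if_neg (fun hh : e.1 = f => h hh.symm),
      List.append_nil, Bool.false_eq_true, if_false]

theorem pvGroup_insert_fresh (files : List String) (es : List (String × Int × String))
    (cf : String) (hcf : cf ∉ files) (hes : ∀ e ∈ es, e.1 ∈ files) :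
    (pvGroup files es).insert cf [] = pvGroup (files ++ [cf]) es := by
  apply PySem.Dict.ext
  rw [PySem.Dict.items_insert]
  rw [if_neg (by rw [pvGroup_contains]; simpa using hcf)]
  show (files.map (fun f => (f, pvEvFor f es))) ++ [(cf, [])] = (files ++ [cf]).map _
  rw [List.map_append]
  simp [pvEvFor_eq_nil cf files es hcf hes]

-- the new current_new_line an "@@ " header sets (shared verbatim by both ports)
def pvHunkLn (raw : String) (ln : Int) : Int :=
  let parts := (PySem.Str.split? raw "+").getD []
  if 2 ≤ parts.length then
    match PySem.Int.ofStr? (((PySem.Str.split? (parts.getD 1 "") ",").getD []).getD 0 "") with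
    | some n => n - 1
    | none => 0
  else ln

-- the stored content of a kept line (shared verbatim by both ports)
def pvContent (raw : String) : String :=
  if PySem.Str.startswith raw "+" then PySem.Str.slice raw (some 1) none else raw

theorem pvStepA_header (d : PySem.Dict String (List (Int × String))) (cf : String) (ln : Int)
    (raw : String) (h1 : PySem.Str.startswith raw "+++ b/" = true) :
    pvStepA (d, cf, ln) raw =
      (if d.contains (PySem.Str.slice raw (some 6) none) then d
       else d.insert (PySem.Str.slice raw (some 6) none) [], PySem.Str.slice raw (some 6) none, ln) := by
  unfold pvStepA; rw [if_pos h1]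

theorem pvStepB_header (files : List String) (es : List (String × Int × String)) (cf : String)
    (ln : Int) (raw : String) (h1 : PySem.Str.startswith raw "+++ b/" = true) :
    pvStepB (files, es, cf, ln) raw =
      (if PySem.Str.slice raw (some 6) none ∈ files then files
       else files ++ [PySem.Str.slice raw (some 6) none], es, PySem.Str.slice raw (some 6) none, ln) := by
  unfold pvStepB; rw [if_pos h1]

theorem pvStepA_hunk (d : PySem.Dict String (List (Int × String))) (cf : String) (ln : Int)
    (raw : String) (h1 : ¬ PySem.Str.startswith raw "+++ b/" = true)
    (h2 : PySem.Str.startswith raw "@@ " = true) :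
    pvStepA (d, cf, ln) raw = (d, cf, pvHunkLn raw ln) := by
  unfold pvStepA pvHunkLn
  rw [if_neg h1, if_pos h2]
  by_cases h3 : 2 ≤ ((PySem.Str.split? raw "+").getD []).length
  · rw [if_pos h3, if_pos h3]
    cases PySem.Int.ofStr?
        (((PySem.Str.split? (((PySem.Str.split? raw "+").getD []).getD 1 "") ",").getD []).getD 0 "") with
    | none => rfl
    | some n => rfl
  · rw [if_neg h3, if_neg h3]

theorem pvStepB_hunk (files : List String) (es : List (String × Int × String)) (cf : String)
    (ln : Int) (raw : String) (h1 : ¬ PySem.Str.startswith raw "+++ b/" = true)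
    (h2 : PySem.Str.startswith raw "@@ " = true) :
    pvStepB (files, es, cf, ln) raw = (files, es, cf, pvHunkLn raw ln) := by
  unfold pvStepB pvHunkLn
  rw [if_neg h1, if_pos h2]
  by_cases h3 : 2 ≤ ((PySem.Str.split? raw "+").getD []).length
  · rw [if_pos h3, if_pos h3]
    cases PySem.Int.ofStr?
        (((PySem.Str.split? (((PySem.Str.split? raw "+").getD []).getD 1 "") ",").getD []).getD 0 "") with
    | none => rfl
    | some n => rfl
  · rw [if_neg h3, if_neg h3]

theorem pvStepA_minus (d : PySem.Dict String (List (Int × String))) (cf : String) (ln : Int)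
    (raw : String) (h1 : ¬ PySem.Str.startswith raw "+++ b/" = true)
    (h2 : ¬ PySem.Str.startswith raw "@@ " = true)
    (h4 : PySem.Str.startswith raw "-" = true) :
    pvStepA (d, cf, ln) raw = (d, cf, ln) := by
  unfold pvStepA; rw [if_neg h1, if_neg h2, if_pos h4]

theorem pvStepB_minus (files : List String) (es : List (String × Int × String)) (cf : String)
    (ln : Int) (raw : String) (h1 : ¬ PySem.Str.startswith raw "+++ b/" = true)
    (h2 : ¬ PySem.Str.startswith raw "@@ " = true)
    (h4 : PySem.Str.startswith raw "-" = true) :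
    pvStepB (files, es, cf, ln) raw = (files, es, cf, ln) := by
  unfold pvStepB; rw [if_neg h1, if_neg h2, if_pos h4]

theorem pvStepA_keep (d : PySem.Dict String (List (Int × String))) (cf : String) (ln : Int)
    (raw : String) (h1 : ¬ PySem.Str.startswith raw "+++ b/" = true)
    (h2 : ¬ PySem.Str.startswith raw "@@ " = true)
    (h4 : ¬ PySem.Str.startswith raw "-" = true) :
    pvStepA (d, cf, ln) raw =
      (if cf ≠ "" then (d.insert cf (d.getD cf [] ++ [(ln + 1, pvContent raw)]), cf, ln + 1)
       else (d, cf, ln + 1)) := by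
  unfold pvStepA pvContent; rw [if_neg h1, if_neg h2, if_neg h4]

theorem pvStepB_keep (files : List String) (es : List (String × Int × String)) (cf : String)
    (ln : Int) (raw : String) (h1 : ¬ PySem.Str.startswith raw "+++ b/" = true)
    (h2 : ¬ PySem.Str.startswith raw "@@ " = true)
    (h4 : ¬ PySem.Str.startswith raw "-" = true) :
    pvStepB (files, es, cf, ln) raw =
      (if cf ≠ "" then (files, es ++ [(cf, ln + 1, pvContent raw)], cf, ln + 1)
       else (files, es, cf, ln + 1)) := by
  unfold pvStepB pvContent; rw [if_neg h1, if_neg h2, if_neg h4]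

-- loop invariant of B's parse
def pvInvGood (files : List String) (es : List (String × Int × String)) (cf : String) : Prop :=
  files.Nodup ∧ (cf = "" ∨ cf ∈ files) ∧ (∀ e ∈ es, e.1 ∈ files)

theorem pvStep_rel (raw : String) (files : List String) (es : List (String × Int × String))
    (cf : String) (ln : Int) (h : pvInvGood files es cf) :
    pvStepA (pvGroup files es, cf, ln) raw
      = (pvGroup (pvStepB (files, es, cf, ln) raw).1 (pvStepB (files, es, cf, ln) raw).2.1,
         (pvStepB (files, es, cf, ln) raw).2.2)
    ∧ pvInvGood (pvStepB (files, es, cf, ln) raw).1 (pvStepB (files, es, cf, ln) raw).2.1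
        (pvStepB (files, es, cf, ln) raw).2.2.1 := by
  obtain ⟨hnd, hcf, hes⟩ := h
  by_cases h1 : PySem.Str.startswith raw "+++ b/" = true
  · rw [pvStepA_header _ _ _ _ h1, pvStepB_header _ _ _ _ _ h1]
    set c := PySem.Str.slice raw (some 6) none with hc
    by_cases h2 : c ∈ files
    · have hcont : (pvGroup files es).contains c = true := by
        rw [pvGroup_contains]; simpa using h2
      rw [if_pos hcont, if_pos h2]
      exact ⟨rfl, hnd, Or.inr h2, hes⟩
    · have hcont : (pvGroup files es).contains c = false := by
        rw [pvGroup_contains]; simpa using h2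
      rw [if_neg (by simp [hcont]), if_neg h2]
      refine ⟨?_, ?_, Or.inr (by simp), fun e he => by simp [hes e he]⟩
      · rw [pvGroup_insert_fresh files es c h2 hes]
      · simp only [List.nodup_append, List.nodup_singleton, true_and, hnd, List.mem_singleton]
        intro a ha b hb
        subst hb
        exact fun hac => h2 (hac ▸ ha)
  · by_cases h2 : PySem.Str.startswith raw "@@ " = true
    · rw [pvStepA_hunk _ _ _ _ h1 h2, pvStepB_hunk _ _ _ _ _ h1 h2]
      exact ⟨rfl, hnd, hcf, hes⟩
    · by_cases h4 : PySem.Str.startswith raw "-" = true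
      · rw [pvStepA_minus _ _ _ _ h1 h2 h4, pvStepB_minus _ _ _ _ _ h1 h2 h4]
        exact ⟨rfl, hnd, hcf, hes⟩
      · rw [pvStepA_keep _ _ _ _ h1 h2 h4, pvStepB_keep _ _ _ _ _ h1 h2 h4]
        by_cases h5 : cf ≠ ""
        · rw [if_pos h5, if_pos h5]
          have hmem : cf ∈ files := hcf.resolve_left h5
          refine ⟨?_, hnd, hcf, ?_⟩
          · rw [pvGroup_getD files es cf hnd hmem]
            rw [pvGroup_insert files es (cf, ln + 1, pvContent raw) hmem]
          · intro e he
            rcases List.mem_append.mp he with h | h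
            · exact hes e h
            · simp only [List.mem_singleton] at h
              subst h; exact hmem
        · rw [if_neg h5, if_neg h5]
          exact ⟨rfl, hnd, hcf, hes⟩

theorem pvFold_rel (lines : List String) (files : List String) (es : List (String × Int × String))
    (cf : String) (ln : Int) (h : pvInvGood files es cf) :
    lines.foldl pvStepA (pvGroup files es, cf, ln)
      = (pvGroup (lines.foldl pvStepB (files, es, cf, ln)).1
           (lines.foldl pvStepB (files, es, cf, ln)).2.1,
         (lines.foldl pvStepB (files, es, cf, ln)).2.2)
    ∧ pvInvGood (lines.foldl pvStepB (files, es, cf, ln)).1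
        (lines.foldl pvStepB (files, es, cf, ln)).2.1
        (lines.foldl pvStepB (files, es, cf, ln)).2.2.1 := by
  induction lines generalizing files es cf ln with
  | nil => exact ⟨rfl, h⟩
  | cons raw rest ih =>
      obtain ⟨heq, hinv⟩ := pvStep_rel raw files es cf ln h
      simp only [List.foldl_cons, heq]
      exact ih _ _ _ _ hinv

-- B's pass 2 rebuilds the same grouping
theorem pvGroup_base (files : List String) (hnd : files.Nodup) :
    files.foldl (fun d fp => d.insert fp ([] : List (Int × String))) PySem.Dict.empty
      = pvGroup files [] := by
  apply PySem.Dict.ext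
  rw [PySem.Dict.items_foldl_insert_fresh files (fun fp => fp) (fun _ => []) PySem.Dict.empty
        (fun a _ => PySem.Dict.contains_empty a) (by simpa using hnd)]
  simp [pvGroup, pvEvFor, PySem.Dict.empty]

theorem pvGroup_fold (files : List String) (es : List (String × Int × String))
    (hnd : files.Nodup) (hes : ∀ e ∈ es, e.1 ∈ files) :
    es.foldl (fun d e => d.insert e.1 (d.getD e.1 [] ++ [e.2]))
        (files.foldl (fun d fp => d.insert fp ([] : List (Int × String))) PySem.Dict.empty)
      = pvGroup files es := by
  rw [pvGroup_base files hnd]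
  induction es using List.reverseRecOn with
  | nil => rfl
  | append_singleton es e ih =>
      rw [List.foldl_append, ih (fun x hx => hes x (List.mem_append_left _ hx)), List.foldl_cons,
          List.foldl_nil]
      have he : e.1 ∈ files := hes e (List.mem_append_right _ (List.mem_singleton.mpr rfl))
      rw [pvGroup_getD files es e.1 hnd he, pvGroup_insert files es e he]

-- ----- phase 2/3: per-file snippet maps agree -----

-- the dict a list of (line, content) pairs collapses to (A's line_map comprehension / B's dict(pairs))
def pvToD (l : List (Int × String)) : PySem.Dict Int String :=
  l.foldl (fun d q => d.insert q.1 q.2) PySem.Dict.empty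

theorem pvToD_nodup (l : List (Int × String)) : (pvToD l).keys.Nodup := by
  simpa [pvToD] using
    PySem.Dict.nodup_keys_foldl_insert_key l Prod.fst (fun _ q => q.2) PySem.Dict.empty (by simp)

-- key-indexed value map over a dict (A's snippet_map is one)
def pvMapVal {K V W : Type} (f : K → V → W) (d : PySem.Dict K V) : PySem.Dict K W :=
  PySem.Dict.mk (d.items.map (fun p => (p.1, f p.1 p.2)))

theorem pvMapVal_contains {K V W : Type} [BEq K] (f : K → V → W) (d : PySem.Dict K V) (k : K) :
    (pvMapVal f d).contains k = d.contains k := by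
  simp only [pvMapVal, PySem.Dict.contains, List.any_map]
  rfl

theorem pvMapVal_insert {K V W : Type} [BEq K] [LawfulBEq K] (f : K → V → W) (d : PySem.Dict K V)
    (k : K) (v : V) :
    (pvMapVal f d).insert k (f k v) = pvMapVal f (d.insert k v) := by
  by_cases h : d.contains k = true
  · simp only [PySem.Dict.insert, pvMapVal_contains, h, if_true]
    simp only [pvMapVal, List.map_map]
    congr 1
    apply List.map_congr_left
    intro p _
    by_cases hk : (p.1 == k) = true
    · have hpk : p.1 = k := by simpa using hk
      simp [Function.comp, hpk]
    · simp [Function.comp, hk]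
  · simp only [PySem.Dict.insert, pvMapVal_contains, h]
    simp [pvMapVal]

-- A's snippet_map loop is a value map over the collapsed dict
theorem pvSnipFold (g : Int → String) (l : List (Int × String)) (d : PySem.Dict Int String) :
    l.foldl (fun sm q => sm.insert q.1 (g q.1)) (pvMapVal (fun k _ => g k) d)
      = pvMapVal (fun k _ => g k) (l.foldl (fun d q => d.insert q.1 q.2) d) := by
  induction l generalizing d with
  | nil => rfl
  | cons q rest ih =>
      simp only [List.foldl_cons]
      rw [pvMapVal_insert (fun k _ => g k) d q.1 q.2, ih]

-- A's snippet_map for one file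
def pvSnipMap (l : List (Int × String)) : PySem.Dict Int String :=
  l.foldl (fun sm q => sm.insert q.1 (pvSnippetA (pvToD l) q.1)) PySem.Dict.empty

theorem pvSnipMap_items (l : List (Int × String)) :
    (pvSnipMap l).items = (pvToD l).items.map (fun q => (q.1, pvSnippetA (pvToD l) q.1)) := by
  have h0 := pvSnipFold (fun k => pvSnippetA (pvToD l) k) l PySem.Dict.empty
  have h1 : pvSnipMap l = pvMapVal (fun k _ => pvSnippetA (pvToD l) k) (pvToD l) := h0
  rw [h1]
  rfl

-- ----- the adjacency argument: positional neighbours in the sorted list = dict membership of ln±1 -----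

theorem pvRows_eq (lm : PySem.Dict Int String) (ordered : List (Int × String))
    (hperm : ordered.Perm lm.items) (hnd : lm.keys.Nodup)
    (hlt : ordered.Pairwise (fun a b => a.1 < b.1))
    (n : Nat) (hn : n < ordered.length) :
    pvRowsB ordered (n : Int) ordered[n].1 ordered[n].2 = pvSnippetA lm ordered[n].1 := by
  have L1 : ∀ t w, lm.get? t = some w ↔ (t, w) ∈ ordered := by
    intro t w
    rw [PySem.Dict.get?_eq_some_iff_mem_items lm t w hnd]
    exact (hperm.mem_iff).symm
  have hmono := List.pairwise_iff_getElem.mp hlt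
  have hn1 : n - 1 < ordered.length := lt_of_le_of_lt (Nat.sub_le n 1) hn
  have hc : lm.get? ordered[n].1 = some ordered[n].2 :=
    (L1 _ _).mpr (by simp only [Prod.mk.eta]; exact List.getElem_mem hn)
  -- previous line
  have hprev : lm.get? (ordered[n].1 - 1)
      = if 0 < n ∧ ordered[n-1].1 = ordered[n].1 - 1 then some ordered[n-1].2 else none := by
    split_ifs with h
    · refine (L1 _ _).mpr ?_
      have : (ordered[n].1 - 1, ordered[n-1].2) = ordered[n-1] := by
        rw [← h.2]
      rw [this]
      exact List.getElem_mem hn1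
    · cases hg : lm.get? (ordered[n].1 - 1) with
      | none => rfl
      | some w =>
        exfalso
        obtain ⟨j, hj, hje⟩ := List.mem_iff_getElem.mp ((L1 _ _).mp hg)
        have hj1 : ordered[j].1 = ordered[n].1 - 1 := by rw [hje]
        have hjn : j < n := by
          rcases lt_trichotomy j n with h' | h' | h'
          · exact h'
          · subst h'; omega
          · have := hmono n j hn hj h'
            omega
        have h0n : 0 < n := lt_of_le_of_lt (Nat.zero_le j) hjn
        rcases Nat.lt_or_ge j (n - 1) with h' | h'
        · have ha := hmono j (n - 1) hj hn1 h'
          have hb := hmono (n - 1) n hn1 hn (by omega)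
          omega
        · have hj' : j = n - 1 := by omega
          subst hj'
          exact h ⟨h0n, hj1⟩
  -- next line
  have hnext : lm.get? (ordered[n].1 + 1)
      = if h : n + 1 < ordered.length then
          (if ordered[n+1].1 = ordered[n].1 + 1 then some ordered[n+1].2 else none)
        else none := by
    split_ifs with hL h
    · refine (L1 _ _).mpr ?_
      have : (ordered[n].1 + 1, ordered[n+1].2) = ordered[n+1] := by rw [← h]
      rw [this]
      exact List.getElem_mem hL
    all_goals {
      cases hg : lm.get? (ordered[n].1 + 1) with
      | none => rfl
      | some w =>
        exfalso
        obtain ⟨j, hj, hje⟩ := List.mem_iff_getElem.mp ((L1 _ _).mp hg)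
        have hj1 : ordered[j].1 = ordered[n].1 + 1 := by rw [hje]
        have hjn : n < j := by
          rcases lt_trichotomy j n with h' | h' | h'
          · have := hmono j n hj hn h'
            omega
          · subst h'; omega
          · exact h'
        first
        | · -- case: n + 1 < length, fst mismatch at n+1
            rcases Nat.lt_or_ge (n + 1) j with h' | h'
            · have ha := hmono (n + 1) j hL hj h'
              have hb := hmono n (n + 1) hn hL (by omega)
              omega
            · have hj' : j = n + 1 := by omega
              subst hj'
              exact h hj1
        | · -- case: n + 1 ≥ length
            omega
    }
  -- evaluate both sides
  show PySem.Str.join "\n" _ = PySem.Str.join "\n" _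
  congr 1
  have e1 : ordered[n].1 + -1 = ordered[n].1 - 1 := by ring
  have e0 : ordered[n].1 + 0 = ordered[n].1 := by ring
  simp only [List.foldl_cons, List.foldl_nil, e1, e0, hc, hprev, hnext]
  by_cases hp : 0 < n ∧ ordered[n-1].1 = ordered[n].1 - 1
  · have hip : 0 < (n : Int) ∧ (PySem.List.pyGetD ordered ((n : Int) - 1) (0, "")).1 = ordered[n].1 - 1 := by
      have hcast : (n : Int) - 1 = ((n - 1 : Nat) : Int) := by omega
      rw [hcast, PySem.List.pyGetD_natCast, List.getD_eq_getElem _ _ hn1]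
      exact ⟨by exact_mod_cast hp.1, hp.2⟩
    have hgp : PySem.List.pyGetD ordered ((n : Int) - 1) (0, "") = ordered[n-1] := by
      have hcast : (n : Int) - 1 = ((n - 1 : Nat) : Int) := by omega
      rw [hcast, PySem.List.pyGetD_natCast, List.getD_eq_getElem _ _ hn1]
    rw [if_pos hp, if_pos hip, hgp]
    by_cases hq : n + 1 < ordered.length
    · by_cases hq2 : ordered[n+1].1 = ordered[n].1 + 1
      · have hiq : (n : Int) + 1 < (ordered.length : Int) ∧
            (PySem.List.pyGetD ordered ((n : Int) + 1) (0, "")).1 = ordered[n].1 + 1 := by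
          have hcast : (n : Int) + 1 = ((n + 1 : Nat) : Int) := by omega
          rw [hcast, PySem.List.pyGetD_natCast, List.getD_eq_getElem _ _ hq]
          exact ⟨by exact_mod_cast hq, hq2⟩
        have hgq : PySem.List.pyGetD ordered ((n : Int) + 1) (0, "") = ordered[n+1] := by
          have hcast : (n : Int) + 1 = ((n + 1 : Nat) : Int) := by omega
          rw [hcast, PySem.List.pyGetD_natCast, List.getD_eq_getElem _ _ hq]
        rw [dif_pos hq, if_pos hq2, if_pos hiq, hgq]
        simp [String.append_assoc]
      · have hiq : ¬ ((n : Int) + 1 < (ordered.length : Int) ∧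
            (PySem.List.pyGetD ordered ((n : Int) + 1) (0, "")).1 = ordered[n].1 + 1) := by
          have hcast : (n : Int) + 1 = ((n + 1 : Nat) : Int) := by omega
          rw [hcast, PySem.List.pyGetD_natCast, List.getD_eq_getElem _ _ hq]
          exact fun hh => hq2 hh.2
        rw [dif_pos hq, if_neg hq2, if_neg hiq]
        simp [String.append_assoc]
    · have hiq : ¬ ((n : Int) + 1 < (ordered.length : Int) ∧
          (PySem.List.pyGetD ordered ((n : Int) + 1) (0, "")).1 = ordered[n].1 + 1) := by
        intro hh
        have := hh.1
        omega
      rw [dif_neg hq, if_neg hiq]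
      simp [String.append_assoc]
  · have hip : ¬ (0 < (n : Int) ∧ (PySem.List.pyGetD ordered ((n : Int) - 1) (0, "")).1 = ordered[n].1 - 1) := by
      intro hh
      have h0 : 0 < n := by exact_mod_cast hh.1
      apply hp
      refine ⟨h0, ?_⟩
      have hcast : (n : Int) - 1 = ((n - 1 : Nat) : Int) := by omega
      rw [hcast, PySem.List.pyGetD_natCast, List.getD_eq_getElem _ _ hn1] at hh
      exact hh.2
    rw [if_neg hp, if_neg hip]
    by_cases hq : n + 1 < ordered.length
    · by_cases hq2 : ordered[n+1].1 = ordered[n].1 + 1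
      · have hiq : (n : Int) + 1 < (ordered.length : Int) ∧
            (PySem.List.pyGetD ordered ((n : Int) + 1) (0, "")).1 = ordered[n].1 + 1 := by
          have hcast : (n : Int) + 1 = ((n + 1 : Nat) : Int) := by omega
          rw [hcast, PySem.List.pyGetD_natCast, List.getD_eq_getElem _ _ hq]
          exact ⟨by exact_mod_cast hq, hq2⟩
        have hgq : PySem.List.pyGetD ordered ((n : Int) + 1) (0, "") = ordered[n+1] := by
          have hcast : (n : Int) + 1 = ((n + 1 : Nat) : Int) := by omega
          rw [hcast, PySem.List.pyGetD_natCast, List.getD_eq_getElem _ _ hq]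
        rw [dif_pos hq, if_pos hq2, if_pos hiq, hgq]
        simp [String.append_assoc]
      · have hiq : ¬ ((n : Int) + 1 < (ordered.length : Int) ∧
            (PySem.List.pyGetD ordered ((n : Int) + 1) (0, "")).1 = ordered[n].1 + 1) := by
          have hcast : (n : Int) + 1 = ((n + 1 : Nat) : Int) := by omega
          rw [hcast, PySem.List.pyGetD_natCast, List.getD_eq_getElem _ _ hq]
          exact fun hh => hq2 hh.2
        rw [dif_pos hq, if_neg hq2, if_neg hiq]
        simp [String.append_assoc]
    · have hiq : ¬ ((n : Int) + 1 < (ordered.length : Int) ∧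
          (PySem.List.pyGetD ordered ((n : Int) + 1) (0, "")).1 = ordered[n].1 + 1) := by
        intro hh
        have := hh.1
        omega
      rw [dif_neg hq, if_neg hiq]
      simp [String.append_assoc]

-- B's per-file block returns exactly A's snippet map
theorem pvFileSnips_items (l : List (Int × String)) :
    (pvFileSnips l).items = (pvToD l).items.map (fun q => (q.1, pvSnippetA (pvToD l) q.1)) := by
  unfold pvFileSnips
  dsimp only
  set lm := l.foldl (fun d q => d.insert q.1 q.2) PySem.Dict.empty with hlm
  have hlmtoD : pvToD l = lm := rfl
  rw [hlmtoD]
  set ordered := PySem.List.sorted lm.items (fun p => p.1) false with hord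
  have hperm : ordered.Perm lm.items := PySem.List.sorted_perm lm.items (fun p => p.1) false
  have hnd : lm.keys.Nodup := pvToD_nodup l
  have hkeys : lm.keys = lm.items.map Prod.fst := rfl
  have hndo : (ordered.map Prod.fst).Nodup :=
    ((hperm.map Prod.fst).nodup_iff).mpr (hkeys ▸ hnd)
  have hle : ordered.Pairwise (fun a b => a.1 ≤ b.1) :=
    PySem.List.sorted_pairwise lm.items (fun p => p.1)
  have hne : ordered.Pairwise (fun a b => a.1 ≠ b.1) := (List.pairwise_map).mp hndo
  have hlt : ordered.Pairwise (fun a b => a.1 < b.1) :=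
    (hle.and hne).imp (fun h => lt_of_le_of_ne h.1 h.2)
  set snip := (PySem.List.enumerate ordered 0).foldl
      (fun sm iq => sm.insert iq.2.1 (pvRowsB ordered iq.1 iq.2.1 iq.2.2)) PySem.Dict.empty
    with hsnip
  have hmapkeys : (PySem.List.enumerate ordered 0).map (fun iq => iq.2.1) = ordered.map Prod.fst := by
    have h : (fun iq : Int × (Int × String) => iq.2.1)
        = Prod.fst ∘ (fun x : Int × (Int × String) => x.2) := rfl
    rw [h, ← List.map_map, PySem.List.map_snd_enumerate]
  have hsnip_items : snip.items = (PySem.List.enumerate ordered 0).map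
      (fun iq => (iq.2.1, pvRowsB ordered iq.1 iq.2.1 iq.2.2)) := by
    have h := PySem.Dict.items_foldl_insert_fresh (PySem.List.enumerate ordered 0)
      (fun iq => iq.2.1) (fun iq => pvRowsB ordered iq.1 iq.2.1 iq.2.2) PySem.Dict.empty
      (fun a _ => PySem.Dict.contains_empty _) (by rw [hmapkeys]; exact hndo)
    simpa using h
  have hsnipkeys : snip.keys.Nodup := by
    show (snip.items.map Prod.fst).Nodup
    rw [hsnip_items, List.map_map]
    have h : (Prod.fst ∘ fun iq : Int × (Int × String) =>
        (iq.2.1, pvRowsB ordered iq.1 iq.2.1 iq.2.2)) = fun iq => iq.2.1 := rfl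
    rw [h, hmapkeys]
    exact hndo
  have hfin : (lm.keys.foldl (fun d k => d.insert k (snip.getD k "")) PySem.Dict.empty).items
      = lm.keys.map (fun k => (k, snip.getD k "")) := by
    have h := PySem.Dict.items_foldl_insert_fresh lm.keys (fun k => k)
      (fun k => snip.getD k "") PySem.Dict.empty (fun a _ => PySem.Dict.contains_empty a)
      (by simpa using hnd)
    simpa using h
  rw [hfin, hkeys, List.map_map]
  apply List.map_congr_left
  intro q hq
  show (q.1, snip.getD q.1 "") = (q.1, pvSnippetA lm q.1)
  refine congrArg (fun z => (q.1, z)) ?_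
  have hqo : q ∈ ordered := hperm.mem_iff.mpr hq
  obtain ⟨n, hn, hge⟩ := List.mem_iff_getElem.mp hqo
  have henum : ((n : Int), q) ∈ PySem.List.enumerate ordered 0 := by
    rw [PySem.List.mem_enumerate_iff]
    exact ⟨n, hn, by simp [hge]⟩
  have hmem : (q.1, pvRowsB ordered (n : Int) q.1 q.2) ∈ snip.items := by
    rw [hsnip_items]
    exact List.mem_map.mpr ⟨((n : Int), q), henum, rfl⟩
  rw [PySem.Dict.getD_of_mem_items snip hmem hsnipkeys ""]
  have h := pvRows_eq lm ordered hperm hnd hlt n hn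
  rw [hge] at h
  exact h

theorem build_eq (diff : String) : build_diff_lines_map_py diff = build_diff_lines_map_py_alt diff := by
  unfold build_diff_lines_map_py build_diff_lines_map_py_alt
  have hrel := pvFold_rel (PySem.Str.splitlines diff) [] [] "" 0 ⟨List.nodup_nil, Or.inl rfl, by simp⟩
  set sB := (PySem.Str.splitlines diff).foldl pvStepB ([], [], "", 0) with hsB
  obtain ⟨hfold, hnd, -, hes⟩ := hrel
  have hA0 : (PySem.Str.splitlines diff).foldl pvStepA (PySem.Dict.empty, "", 0)
      = (pvGroup sB.1 sB.2.1, sB.2.2) := hfold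
  rw [hA0]
  dsimp only
  rw [pvGroup_fold sB.1 sB.2.1 hnd hes]
  set G := pvGroup sB.1 sB.2.1 with hG
  have hGnd : (G.items.map Prod.fst).Nodup := by
    have h : G.items.map Prod.fst = G.keys := rfl
    rw [h, hG, pvGroup_keys]
    exact hnd
  have hA : (G.items.foldl (fun sn p =>
      sn.insert p.1 (p.2.foldl (fun sm q =>
        sm.insert q.1 (pvSnippetA (p.2.foldl (fun d q => d.insert q.1 q.2) PySem.Dict.empty) q.1))
        PySem.Dict.empty)) PySem.Dict.empty).items
      = G.items.map (fun p => (p.1, pvSnipMap p.2)) := by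
    have h := PySem.Dict.items_foldl_insert_fresh G.items Prod.fst (fun p => pvSnipMap p.2)
      PySem.Dict.empty (fun a _ => PySem.Dict.contains_empty a.1) hGnd
    simpa [pvSnipMap, pvToD] using h
  have hB : (G.items.foldl (fun sn p => sn.insert p.1 (pvFileSnips p.2)) PySem.Dict.empty).items
      = G.items.map (fun p => (p.1, pvFileSnips p.2)) := by
    have h := PySem.Dict.items_foldl_insert_fresh G.items Prod.fst (fun p => pvFileSnips p.2)
      PySem.Dict.empty (fun a _ => PySem.Dict.contains_empty a.1) hGnd
    simpa using h
  rw [hA, hB]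
  simp only [List.map_map]
  apply List.map_congr_left
  intro p _
  simp only [Function.comp]
  refine congrArg (fun z => (p.1, z)) ?_
  rw [pvSnipMap_items, pvFileSnips_items]

-- ===== VERDICT (by name: the statement is the Claim_ definition above) =====
theorem build_diff_lines_map_py_spec : Claim_equal_build_diff_lines_map_py := by
  intro diff _
  unfold Spec_build_diff_lines_map_py
  exact build_eq diff
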